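-- pv_equiv track=rewrite | github.com/cbaziotis/lm-prior-for-nmt | helpers/text.py | devectorize
-- ===== SOURCE A (Python) =====
-- from itertools import groupby
--
-- def devectorize(data, id2tok, eos=None, strip_eos=False, oov_map=None, pp=False):
--     if strip_eos:
--         for i in range(len(data)):
--             try:
--                 data[i] = data[i][:list(data[i]).index(eos)]
--             except:
--                 continue
--
--     # ids to words
--     data = [[id2tok.get(x, "<unk>") for x in seq] for seq in data]
--
--     if oov_map is not None:
--         data = [[m.get(x, x) for x in seq] for seq, m in zip(data, oov_map)]
--
--     if pp:
--         rules = {f"<oov-{i}>": "UNK" for i in range(10)}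
--         rules["unk"] = "UNK"
--         rules["<unk>"] = "UNK"
--         rules["<sos>"] = ""
--         rules["<eos>"] = ""
--         rules["<pad>"] = ""
--
--         data = [[rules.get(x, x) for x in seq] for seq in data]
--
--         # remove repetitions
--         data = [[x[0] for x in groupby(seq)] for seq in data]
--
--     return data
-- ===== SOURCE B (Python) =====
-- def devectorize(data, id2tok, eos=None, strip_eos=False, oov_map=None, pp=False):
--     rules = None
--     if pp:
--         rules = {f"<oov-{i}>": "UNK" for i in range(10)}
--         rules.update({"unk": "UNK", "<unk>": "UNK",
--                       "<sos>": "", "<eos>": "", "<pad>": ""})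
--
--     def convert(seq, m):
--         # strip at the first eos: explicit scan for the cut index, no exceptions
--         if strip_eos:
--             cut = len(seq)
--             for j, x in enumerate(seq):
--                 if x == eos:
--                     cut = j
--                     break
--             seq = seq[:cut]
--         # build the output back-to-front: walk the reversed sequence and, under pp,
--         # keep only run heads by comparing with the most recently emitted word
--         # (the right-hand neighbour in original order) — no groupby, no staged lists
--         rev = []
--         for x in reversed(seq):
--             w = id2tok.get(x, "<unk>")
--             if m is not None:
--                 w = m.get(w, w)
--             if rules is not None:
--                 w = rules.get(w, w)
--                 if rev and rev[-1] == w: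
--                     continue
--             rev.append(w)
--         return rev[::-1]
--
--     if oov_map is None:
--         return [convert(seq, None) for seq in data]
--     return [convert(seq, m) for seq, m in zip(data, oov_map)]
-- ===== Notes on version B (the rewrite author's own statement) =====
-- stated objective: alternative
-- what changed: B builds each output sequence back-to-front: it walks the reversed token sequence once, consing translated words and, under pp, keeping only run heads by comparing with the most recently emitted (right-hand) word, then reverses - replacing A's four staged list comprehensions plus itertools.groupby; eos stripping finds the cut index with an explicit scan instead of try/except around list.index.
import Mathlib
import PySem

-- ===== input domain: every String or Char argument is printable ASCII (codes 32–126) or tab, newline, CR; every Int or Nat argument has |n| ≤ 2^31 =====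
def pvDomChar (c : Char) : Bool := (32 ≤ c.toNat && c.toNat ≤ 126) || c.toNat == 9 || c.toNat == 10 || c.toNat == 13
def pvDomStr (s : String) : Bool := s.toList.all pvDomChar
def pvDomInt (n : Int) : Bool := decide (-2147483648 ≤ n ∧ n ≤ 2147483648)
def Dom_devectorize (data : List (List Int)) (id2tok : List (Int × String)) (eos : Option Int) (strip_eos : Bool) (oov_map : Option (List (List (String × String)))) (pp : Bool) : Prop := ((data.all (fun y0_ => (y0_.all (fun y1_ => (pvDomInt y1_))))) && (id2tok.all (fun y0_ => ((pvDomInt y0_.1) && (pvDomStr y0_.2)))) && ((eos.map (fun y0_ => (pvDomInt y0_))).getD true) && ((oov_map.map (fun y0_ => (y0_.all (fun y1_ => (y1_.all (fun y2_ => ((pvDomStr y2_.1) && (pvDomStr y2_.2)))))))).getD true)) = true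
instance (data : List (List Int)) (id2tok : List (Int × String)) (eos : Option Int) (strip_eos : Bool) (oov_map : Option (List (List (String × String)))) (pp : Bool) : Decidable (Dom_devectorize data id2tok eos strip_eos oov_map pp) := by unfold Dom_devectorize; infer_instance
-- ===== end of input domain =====

-- B builds each output sequence back-to-front (one walk over the reversed tokens, consing
-- run heads by comparing with the most recently emitted word) instead of A's staged list
-- comprehensions + itertools.groupby, and strips eos by an explicit cut-index scan instead
-- of try/except list.index; objective: alternative decomposition, same cost.
-- A mutates `data` in place under strip_eos (B does not); the equivalence proved here is
-- about the return value only.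

-- ===== PORT A =====

-- heads of itertools.groupby: [x[0] for x in groupby(seq)] (adjacent dedup)
def gbHeads : List String → List String
  | [] => []
  | [x] => [x]
  | x :: y :: xs => if x == y then gbHeads (y :: xs) else x :: gbHeads (y :: xs)

-- data[i][:data[i].index(eos)] with try/except ValueError → unchanged
def stripA : Option Int → List Int → List Int
  | none, seq => seq  -- .index(None) raises ValueError → except: continue
  | some e, seq =>
    match PySem.List.index? seq e with
    | none => seq  -- ValueError → continue
    | some i => PySem.List.slice seq none (some (i : Int))

def devectorize (data : List (List Int)) (id2tok : List (Int × String)) (eos : Option Int) (strip_eos : Bool) (oov_map : Option (List (List (String × String)))) (pp : Bool) : List (List String) :=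
  -- for i in range(len(data)): try: data[i] = data[i][:data[i].index(eos)] except: continue
  let data1 : List (List Int) := if strip_eos then data.map (stripA eos) else data
  -- data = [[id2tok.get(x, "<unk>") for x in seq] for seq in data]
  let d := PySem.Dict.mk id2tok
  let data2 : List (List String) := data1.map (fun seq => seq.map (fun x => d.getD x "<unk>"))
  -- if oov_map is not None: data = [[m.get(x, x) for x in seq] for seq, m in zip(data, oov_map)]
  let data3 : List (List String) :=
    match oov_map with
    | none => data2
    | some ov => (data2.zip ov).map (fun p => p.1.map (fun x => (PySem.Dict.mk p.2).getD x x))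
  if pp then
    let rules : PySem.Dict String String :=
      (PySem.List.pyRange 0 10 1).foldl
        (fun d i => d.insert ("<oov-" ++ PySem.Int.toStr i ++ ">") "UNK") PySem.Dict.empty
    let rules := ((((rules.insert "unk" "UNK").insert "<unk>" "UNK").insert "<sos>" "").insert "<eos>" "").insert "<pad>" ""
    let data4 := data3.map (fun seq => seq.map (fun x => rules.getD x x))
    data4.map gbHeads
  else data3

-- ===== PORT B =====

-- the cut-index scan: first index whose token equals eos, else the length
def cutIdxB (eos : Option Int) : List Int → Nat
  | [] => 0
  | x :: xs => if some x == eos then 0 else cutIdxB eos xs + 1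

-- one step of the reversed walk; `rev` is Python's `rev` list in reverse representation
-- (cons here = append there, so the final rev[::-1] is the accumulator itself; rev[-1] = head?)
def stepB (tok : PySem.Dict Int String) (m : Option (PySem.Dict String String))
    (rules : Option (PySem.Dict String String)) (rev : List String) (x : Int) : List String :=
  let w := tok.getD x "<unk>"
  let w := match m with | none => w | some mm => mm.getD w w
  match rules with
  | none => w :: rev
  | some r =>
    let w2 := r.getD w w
    if rev.head? == some w2 then rev else w2 :: rev

-- convert(seq, m): strip at the cut index, then walk reversed(seq)
def convB (tok : PySem.Dict Int String) (m : Option (PySem.Dict String String))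
    (rules : Option (PySem.Dict String String)) (eos : Option Int) (strip_eos : Bool)
    (seq : List Int) : List String :=
  let seq := if strip_eos then seq.take (cutIdxB eos seq) else seq
  seq.reverse.foldl (stepB tok m rules) []

def rulesB : PySem.Dict String String :=
  let rules : PySem.Dict String String :=
    (PySem.List.pyRange 0 10 1).foldl
      (fun d i => d.insert ("<oov-" ++ PySem.Int.toStr i ++ ">") "UNK") PySem.Dict.empty
  ((((rules.insert "unk" "UNK").insert "<unk>" "UNK").insert "<sos>" "").insert "<eos>" "").insert "<pad>" ""

def devectorize_alt (data : List (List Int)) (id2tok : List (Int × String)) (eos : Option Int) (strip_eos : Bool) (oov_map : Option (List (List (String × String)))) (pp : Bool) : List (List String) :=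
  let tok := PySem.Dict.mk id2tok
  let rules : Option (PySem.Dict String String) := if pp then some rulesB else none
  match oov_map with
  | none => data.map (fun seq => convB tok none rules eos strip_eos seq)
  | some ov => (data.zip ov).map (fun p => convB tok (some (PySem.Dict.mk p.2)) rules eos strip_eos p.1)

-- ===== PRECONDITION & SPEC =====
def Spec_devectorize (data : List (List Int)) (id2tok : List (Int × String)) (eos : Option Int) (strip_eos : Bool) (oov_map : Option (List (List (String × String)))) (pp : Bool) (out : List (List String)) : Prop := out = devectorize_alt data id2tok eos strip_eos oov_map pp
instance (data : List (List Int)) (id2tok : List (Int × String)) (eos : Option Int) (strip_eos : Bool) (oov_map : Option (List (List (String × String)))) (pp : Bool) (out : List (List String)) : Decidable (Spec_devectorize data id2tok eos strip_eos oov_map pp out) := by unfold Spec_devectorize; infer_instance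

-- ===== CLAIM (what is proved, stated in full; the proofs are below) =====
def Claim_equal_devectorize : Prop := ∀ (data : List (List Int)) (id2tok : List (Int × String)) (eos : Option Int) (strip_eos : Bool) (oov_map : Option (List (List (String × String)))) (pp : Bool), Dom_devectorize data id2tok eos strip_eos oov_map pp → Spec_devectorize data id2tok eos strip_eos oov_map pp (devectorize data id2tok eos strip_eos oov_map pp)

-- ===== LEMMAS AND PROOFS =====

-- proof-only helper: the break-loop strip, midpoint between A's index/slice and B's take/cutIdx
def stripSeqB (eos : Option Int) : List Int → List Int
  | [] => []
  | x :: xs => if some x == eos then [] else x :: stripSeqB eos xs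

theorem strip_eq_some (e : Int) (seq : List Int) :
    stripA (some e) seq = stripSeqB (some e) seq := by
  induction seq with
  | nil => simp [stripA, stripSeqB, PySem.List.index?]
  | cons x xs ih =>
    simp only [stripA] at *
    by_cases hx : x = e
    · subst hx
      rw [PySem.List.index?_cons_self]
      change PySem.List.slice (x :: xs) none (some ((0 : Nat) : Int)) = stripSeqB (some x) (x :: xs)
      rw [PySem.List.slice_to_natCast]
      simp [stripSeqB]
    · rw [PySem.List.index?_cons_of_ne xs hx]
      cases h : PySem.List.index? xs e with
      | none =>
        rw [h] at ih
        simp [stripSeqB, hx, ← ih]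
      | some i =>
        rw [h] at ih
        simp only [Option.map_some, PySem.List.slice_to_natCast] at ih ⊢
        simp [stripSeqB, hx, List.take_succ_cons, ← ih]

theorem stripSeq_eq_take (eos : Option Int) (seq : List Int) :
    stripSeqB eos seq = seq.take (cutIdxB eos seq) := by
  induction seq with
  | nil => rfl
  | cons x xs ih =>
    simp only [stripSeqB, cutIdxB]
    split
    · rfl
    · simp [List.take_succ_cons, ih]

theorem stripA_eq (eos : Option Int) (seq : List Int) :
    stripA eos seq = seq.take (cutIdxB eos seq) := by
  cases eos with
  | none =>
    have h : cutIdxB none seq = seq.length := by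
      induction seq with
      | nil => rfl
      | cons x xs ih => simp [cutIdxB, ih]
    simp [stripA, h]
  | some e => rw [strip_eq_some, stripSeq_eq_take]

-- the translated word of one token (id lookup then optional oov map)
def wAB (tok : PySem.Dict Int String) (m : Option (PySem.Dict String String)) (x : Int) : String :=
  let w := tok.getD x "<unk>"
  match m with | none => w | some mm => mm.getD w w

-- the reversed walk as a foldr over the original order
theorem convB_foldr (tok : PySem.Dict Int String) (m : Option (PySem.Dict String String))
    (rules : Option (PySem.Dict String String)) (s : List Int) :
    s.reverse.foldl (stepB tok m rules) [] =
      s.foldr (fun x acc => stepB tok m rules acc x) [] := by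
  rw [List.foldl_reverse]

-- without pp the walk is the plain map
theorem foldr_none (tok : PySem.Dict Int String) (m : Option (PySem.Dict String String))
    (s : List Int) :
    s.foldr (fun x acc => stepB tok m none acc x) [] = s.map (wAB tok m) := by
  induction s with
  | nil => rfl
  | cons x xs ih => simp [stepB, wAB]

-- dedup-from-the-right in original order
theorem gbHeads_head (y : String) (ys : List String) : (gbHeads (y :: ys)).head? = some y := by
  induction ys generalizing y with
  | nil => rfl
  | cons z zs ih =>
    by_cases h : y = z
    · subst h; simp [gbHeads, ih]
    · simp [gbHeads, h]

theorem foldr_dedup (h : Int → String) (s : List Int) :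
    s.foldr (fun x acc => if acc.head? == some (h x) then acc else h x :: acc) [] =
      gbHeads (s.map h) := by
  induction s with
  | nil => rfl
  | cons x xs ih =>
    simp only [List.foldr_cons, List.map_cons, ih]
    cases hm : xs.map h with
    | nil => simp [gbHeads]
    | cons y ys =>
      rw [gbHeads_head]
      by_cases hw : y = h x
      · subst hw; simp [gbHeads]
      · have : (h x == y) = false := by simp [Ne.symm hw]
        simp [gbHeads, hw, this]

-- with pp the walk is gbHeads of the rule-mapped words
theorem foldr_some (tok : PySem.Dict Int String) (m : Option (PySem.Dict String String))
    (r : PySem.Dict String String) (s : List Int) :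
    s.foldr (fun x acc => stepB tok m (some r) acc x) [] =
      gbHeads (s.map (fun x => r.getD (wAB tok m x) (wAB tok m x))) := by
  have hf : (fun (x : Int) (acc : List String) => stepB tok m (some r) acc x)
      = (fun x acc => if acc.head? == some (r.getD (wAB tok m x) (wAB tok m x)) then acc
          else r.getD (wAB tok m x) (wAB tok m x) :: acc) := by
    funext x acc; simp [stepB, wAB]
  rw [hf, foldr_dedup]

-- per-sequence bridge: B's convert equals A's staged pipeline on the stripped sequence
theorem convB_eq (tok : PySem.Dict Int String) (m : Option (PySem.Dict String String))
    (rules : Option (PySem.Dict String String)) (eos : Option Int) (st : Bool) (seq : List Int) :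
    convB tok m rules eos st seq =
      (match rules with
       | none => (if st then stripA eos seq else seq).map (wAB tok m)
       | some r => gbHeads ((if st then stripA eos seq else seq).map
            (fun x => r.getD (wAB tok m x) (wAB tok m x)))) := by
  unfold convB
  rw [show (if st then seq.take (cutIdxB eos seq) else seq)
        = (if st then stripA eos seq else seq) from by cases st <;> simp [stripA_eq]]
  cases rules with
  | none => rw [convB_foldr, foldr_none]
  | some r => rw [convB_foldr, foldr_some]

-- ===== VERDICT (by name: the statement is the Claim_ definition above) =====
theorem devectorize_spec : Claim_equal_devectorize := by
  intro data id2tok eos strip_eos oov_map pp hdom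
  clear hdom
  unfold Spec_devectorize devectorize devectorize_alt
  simp only []
  set tok := PySem.Dict.mk id2tok with htok
  have hdata1 : (if strip_eos then data.map (stripA eos) else data)
      = data.map (fun seq => if strip_eos then stripA eos seq else seq) := by
    cases strip_eos <;> simp
  cases oov_map with
  | none =>
    cases pp with
    | false =>
      simp only [Bool.false_eq_true, if_false, hdata1, List.map_map]
      refine (List.map_congr_left (fun seq _ => ?_)).symm
      rw [convB_eq]
      simp [wAB, Function.comp]
    | true =>
      simp only [if_true, hdata1, List.map_map]
      refine (List.map_congr_left (fun seq _ => ?_)).symm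
      rw [convB_eq]
      simp [wAB, rulesB, Function.comp]
      rfl
  | some ov =>
    cases pp with
    | false =>
      simp only [Bool.false_eq_true, if_false, hdata1, List.map_map]
      rw [List.zip_map_left, List.map_map]
      refine (List.map_congr_left (fun p _ => ?_)).symm
      rw [convB_eq]
      simp [wAB, List.map_map]
    | true =>
      simp only [if_true, hdata1, List.map_map]
      rw [List.zip_map_left, List.map_map]
      refine (List.map_congr_left (fun p _ => ?_)).symm
      rw [convB_eq]
      simp [wAB, rulesB, List.map_map]
      rfl
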